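-- pv_equiv track=rewrite | github.com/Unicorn-Commander/Center-Deep | agents/content_agents.py | _extract_title_and_content
-- ===== SOURCE A (Python) =====
-- def _extract_title_and_content(generated_content: str) -> tuple:
--     """Extract title and content from generated blog post"""
--     lines = generated_content.strip().split('\n')
--
--     title = "Generated Blog Post"  # Default title
--     content_lines = []
--
--     for i, line in enumerate(lines):
--         line = line.strip()
--         if line.startswith('#') and not content_lines:  # First heading is the title
--             title = line.lstrip('# ').strip()
--         else:
--             content_lines.append(line)
--
--     content = '\n'.join(content_lines).strip()
--     return title, content
-- ===== SOURCE B (Python) =====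
-- def _extract_title_and_content(generated_content: str) -> tuple:
--     """Extract title and content: consume the leading run of heading lines (last wins), body is the rest."""
--     lines = [line.strip() for line in generated_content.strip().split('\n')]
--     title = "Generated Blog Post"
--     i = 0
--     while i < len(lines) and lines[i].startswith('#'):
--         title = lines[i].lstrip('# ').strip()
--         i += 1
--     return title, '\n'.join(lines[i:]).strip()
-- ===== Notes on version B (the rewrite author's own statement) =====
-- stated objective: simpler
-- what changed: Replaces the state-threaded append loop (title + growing content_lines with an emptiness test each iteration) by a prefix scan: strip all lines once, consume the leading run of heading lines with last-wins for the title, and take the remaining slice as the body.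
import Mathlib
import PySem

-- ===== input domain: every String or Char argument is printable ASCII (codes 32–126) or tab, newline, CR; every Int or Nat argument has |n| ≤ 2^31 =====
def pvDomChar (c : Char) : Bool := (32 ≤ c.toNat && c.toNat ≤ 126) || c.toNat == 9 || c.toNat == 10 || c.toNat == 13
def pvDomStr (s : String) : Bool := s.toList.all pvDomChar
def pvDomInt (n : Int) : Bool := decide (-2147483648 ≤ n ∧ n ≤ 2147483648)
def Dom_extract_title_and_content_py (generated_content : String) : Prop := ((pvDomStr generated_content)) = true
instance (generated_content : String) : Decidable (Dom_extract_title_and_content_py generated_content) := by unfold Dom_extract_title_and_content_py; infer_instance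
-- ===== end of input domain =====

-- ===== PORT A =====
-- B changes: prefix scan over pre-stripped lines instead of a state-threaded append loop; objective: simpler.
-- shared helper: exact port of Python's line.lstrip('# ') (drop leading '#' and ' ' characters)
def pyLstripHash (s : String) : String :=
  String.mk (s.toList.dropWhile (fun c => c == '#' || c == ' '))

-- A's loop body: title/content_lines state, heading consumed only while content_lines is empty
def aStep (st : String × List String) (line : String) : String × List String :=
  let line := PySem.Str.strip line
  if PySem.Str.startswith line "#" && st.2.isEmpty then
    (PySem.Str.strip (pyLstripHash line), st.2)
  else
    (st.1, st.2 ++ [line])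

def extract_title_and_content_py (generated_content : String) : String × String :=
  let lines := (PySem.Str.split? (PySem.Str.strip generated_content) "\n").getD []
  let st := lines.foldl aStep ("Generated Blog Post", [])
  (st.1, PySem.Str.strip (PySem.Str.join "\n" st.2))

-- ===== PORT B =====
-- consume the leading run of heading lines, last title wins; return the remaining lines
def altConsume (title : String) : List String → String × List String
  | [] => (title, [])
  | l :: rest =>
    if PySem.Str.startswith l "#" then
      altConsume (PySem.Str.strip (pyLstripHash l)) rest
    else
      (title, l :: rest)

def extract_title_and_content_py_alt (generated_content : String) : String × String :=
  let lines := ((PySem.Str.split? (PySem.Str.strip generated_content) "\n").getD []).map PySem.Str.strip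
  let p := altConsume "Generated Blog Post" lines
  (p.1, PySem.Str.strip (PySem.Str.join "\n" p.2))

-- ===== PRECONDITION & SPEC =====
def Spec_extract_title_and_content_py (generated_content : String) (out : String × String) : Prop := out = extract_title_and_content_py_alt generated_content
instance (generated_content : String) (out : String × String) : Decidable (Spec_extract_title_and_content_py generated_content out) := by unfold Spec_extract_title_and_content_py; infer_instance

-- ===== CLAIM =====
def Claim_equal_extract_title_and_content_py : Prop := ∀ (generated_content : String), Dom_extract_title_and_content_py generated_content → Spec_extract_title_and_content_py generated_content (extract_title_and_content_py generated_content)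

-- ===== LEMMAS AND PROOFS =====
-- once content_lines is nonempty, every remaining line is stripped and appended
lemma aStep_after (lines : List String) (t : String) (acc : List String) (h : acc ≠ []) :
    lines.foldl aStep (t, acc) = (t, acc ++ lines.map PySem.Str.strip) := by
  induction lines generalizing acc with
  | nil => simp
  | cons l rest ih =>
    cases acc with
    | nil => exact absurd rfl h
    | cons a as =>
      have hc : aStep (t, a :: as) l = (t, (a :: as) ++ [PySem.Str.strip l]) := by
        simp only [aStep, List.isEmpty_cons, Bool.and_false, if_neg (by simp : ¬False)]
        simp
      rw [List.foldl_cons, hc, ih _ (by simp)]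
      simp
lemma aLoop_eq_consume (lines : List String) (t : String) :
    lines.foldl aStep (t, []) = altConsume t (lines.map PySem.Str.strip) := by
  induction lines generalizing t with
  | nil => simp [altConsume]
  | cons l rest ih =>
    by_cases hs : PySem.Str.startswith (PySem.Str.strip l) "#" = true
    · have hc : aStep (t, []) l = (PySem.Str.strip (pyLstripHash (PySem.Str.strip l)), []) := by
        simp only [aStep, List.isEmpty_nil, Bool.and_true]
        rw [if_pos hs]
      rw [List.foldl_cons, hc, List.map_cons]
      simp only [altConsume]
      rw [if_pos hs, ih]
    · have hc : aStep (t, []) l = (t, [PySem.Str.strip l]) := by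
        simp only [aStep, List.isEmpty_nil, Bool.and_true]
        rw [if_neg hs]
        rfl
      rw [List.foldl_cons, hc, aStep_after rest t [PySem.Str.strip l] (by simp), List.map_cons]
      simp only [altConsume]
      rw [if_neg hs]
      simp

-- ===== VERDICT =====
theorem extract_title_and_content_py_spec : Claim_equal_extract_title_and_content_py := by
  intro g _
  unfold Spec_extract_title_and_content_py
  simp only [extract_title_and_content_py, extract_title_and_content_py_alt, aLoop_eq_consume]
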